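-- pv_equiv track=rewrite | github.com/ankurd1/multiliner | plugin/multiliner.py | unmultiline
-- ===== SOURCE A (Python) =====
-- COMMA = ','
--
-- OPEN_PAREN = '('
--
-- CLOSE_PAREN = ')'
--
-- def _parse(txt, start):
--     outermost_paren_start = -1
--     outermost_paren_end = -1
--     commas = []
--
--     paren_count = 0
--     for i in range(start, len(txt)):
--         if txt[i] == OPEN_PAREN:
--             paren_count -= 1
--             if paren_count == -1:
--                 outermost_paren_start = i
--         elif txt[i] == CLOSE_PAREN:
--             paren_count += 1
--             if paren_count > 0:
--                 break
--             elif paren_count == 0: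
--                 outermost_paren_end = i
--                 break
--         elif txt[i] == COMMA:
--             if paren_count == -1:
--                 commas.append(i)
--
--     if paren_count != 0:
--         return (-1, -1, [])
--     if outermost_paren_start == -1 and outermost_paren_end == -1:
--         return (-1, -1, [])
--     return (outermost_paren_start, outermost_paren_end, commas)
--
-- def unmultiline(inp):
--     if (len(inp) == 1):
--         return inp
--
--     lines = '\n'.join(inp)
--     start, end, commas = _parse(lines, 0)
--
--     if len(inp[0]) <= start:
--         # No opening paren in the first line
--         return inp
--
--     line0 = inp[0]
--     char_index = len(line0) + 1
--     line_index = 1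
--
--     for line in inp[1:]:
--         if (end < char_index):
--             break
--         else:
--             line0 = line0 + line.strip()
--             if (char_index + len(line) - 1) in commas:
--                 # last char of line is a comma, add a space
--                 line0 += ' '
--             line_index += 1
--         char_index += len(line) + 1
--
--     result = [line0]
--     if line_index < len(inp):
--         result += inp[line_index:]
--
--     return result
-- ===== SOURCE B (Python) =====
-- # Single left-to-right pass with an explicit paren state machine over the lines
-- # themselves (no join, no precomputed comma-index list).
-- BEFORE, IN, DONE, INVALID = 0, 1, 2, 3
--
-- def unmultiline(inp):
--     if len(inp) == 1:
--         return inp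
--
--     state, depth = BEFORE, 0
--
--     def step(ch):
--         nonlocal state, depth
--         if state == BEFORE:
--             if ch == '(':
--                 state, depth = IN, 1
--             elif ch == ')':
--                 state = INVALID
--         elif state == IN:
--             if ch == '(':
--                 depth += 1
--             elif ch == ')':
--                 depth -= 1
--                 if depth == 0:
--                     state = DONE
--
--     for ch in inp[0]:
--         step(ch)
--     if state != IN:
--         # no '(' opened (and still open) within the first line
--         return inp
--
--     merged = inp[0]
--     line_index = 1
--     for line in inp[1:]:
--         if state == DONE:
--             break
--         for ch in line:
--             step(ch)
--         merged += line.strip()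
--         if line.endswith(',') and state == IN and depth == 1:
--             merged += ' '
--         line_index += 1
--
--     if state != DONE:
--         # outermost paren never closed: unbalanced input, leave untouched
--         return inp
--     return [merged] + inp[line_index:]
-- ===== Notes on version B (the rewrite author's own statement) =====
-- stated objective: faster
-- what changed: Replaces the join-everything-then-parse design (A builds the joined text, precomputes the outer paren's start/end indices plus a list of top-level comma positions, then replays them with char_index arithmetic and a linear 'in commas' list scan per merged line) by one direct pass over the lines with an explicit (state, depth) paren machine that decides merging and trailing-comma spacing on the fly.
import Mathlib
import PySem

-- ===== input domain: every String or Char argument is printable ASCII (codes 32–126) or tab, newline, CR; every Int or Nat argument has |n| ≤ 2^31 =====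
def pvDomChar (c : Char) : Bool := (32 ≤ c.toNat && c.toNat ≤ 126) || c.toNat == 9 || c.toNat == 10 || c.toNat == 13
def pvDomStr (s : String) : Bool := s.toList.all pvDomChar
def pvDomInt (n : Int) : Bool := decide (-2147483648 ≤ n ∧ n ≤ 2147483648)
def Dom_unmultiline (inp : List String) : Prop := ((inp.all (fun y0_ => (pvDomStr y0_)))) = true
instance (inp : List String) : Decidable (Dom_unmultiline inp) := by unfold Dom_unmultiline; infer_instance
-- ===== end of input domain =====

-- B merges a multiline call by one pass over the lines with an explicit (state, depth)
-- paren machine, instead of A's join + index-based parse with a precomputed comma list.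
-- Same return value as A on every non-empty input (A raises IndexError on []).

-- ===== PORT A =====

-- post-loop checks of _parse (reached on loop exhaustion or break)
def parseFinish (count s e : Int) (commas : List Int) : Int × Int × List Int :=
  if count ≠ 0 then (-1, -1, [])
  else if s = -1 ∧ e = -1 then (-1, -1, [])
  else (s, e, commas)

-- the 'for i in range(start, len(txt))' loop of _parse; breaks jump to parseFinish
def parseLoop : List Char → Int → Int → Int → Int → List Int → Int × Int × List Int
  | [], _, count, s, e, commas => parseFinish count s e commas
  | c :: cs, i, count, s, e, commas =>
    if c = '(' then
      (if count - 1 = -1 then parseLoop cs (i + 1) (count - 1) i e commas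
       else parseLoop cs (i + 1) (count - 1) s e commas)
    else if c = ')' then
      (if count + 1 > 0 then parseFinish (count + 1) s e commas
       else if count + 1 = 0 then parseFinish (count + 1) s i commas
       else parseLoop cs (i + 1) (count + 1) s e commas)
    else if c = ',' then
      (if count = -1 then parseLoop cs (i + 1) count s e (commas ++ [i])
       else parseLoop cs (i + 1) count s e commas)
    else parseLoop cs (i + 1) count s e commas

-- _parse(txt, start); A only calls it with start = 0
def pyParse (txt : List Char) (start : Int) : Int × Int × List Int :=
  parseLoop (txt.drop start.toNat) start 0 (-1) (-1) []

-- the 'for line in inp[1:]' loop; on break/exhaustion appends the unconsumed tail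
def mergeA (e : Int) (commas : List Int) : List String → List Char → Int → List String
  | [], line0, _ => [String.ofList line0]
  | l :: ls, line0, ci =>
    if e < ci then String.ofList line0 :: l :: ls
    else
      mergeA e commas ls
        (if (ci + PySem.Chars.len l.toList - 1) ∈ commas
         then line0 ++ PySem.Chars.strip l.toList ++ [' ']
         else line0 ++ PySem.Chars.strip l.toList)
        (ci + PySem.Chars.len l.toList + 1)

def unmultiline (inp : List String) : List String :=
  if inp.length = 1 then inp
  else
    match inp with
    | [] => []   -- Python raises IndexError on inp[0] here; outside Pre_
    | line0 :: rest =>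
      let txt := (PySem.Str.join "\n" inp).toList
      let r := pyParse txt 0
      if PySem.Chars.len line0.toList ≤ r.1 then inp
      else mergeA r.2.1 r.2.2 rest line0.toList (PySem.Chars.len line0.toList + 1)

-- ===== PORT B =====

-- Source B's step: states 0 = BEFORE, 1 = IN (with depth), 2 = DONE, 3 = INVALID
def stepB (st : Int × Int) (c : Char) : Int × Int :=
  if st.1 = 0 then
    (if c = '(' then (1, 1) else if c = ')' then (3, st.2) else st)
  else if st.1 = 1 then
    (if c = '(' then (1, st.2 + 1)
     else if c = ')' then (if st.2 = 1 then (2, 0) else (1, st.2 - 1))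
     else st)
  else st

-- Source B's merge loop; none = the final 'if state != DONE: return inp'
def goB : List String → Int × Int → List Char → Option (List Char × List String)
  | [], st, m => if st.1 = 2 then some (m, []) else none
  | l :: ls, st, m =>
    if st.1 = 2 then some (m, l :: ls)
    else
      goB ls (l.toList.foldl stepB st)
        (if PySem.Chars.endswith l.toList [','] ∧ l.toList.foldl stepB st = (1, 1)
         then m ++ PySem.Chars.strip l.toList ++ [' ']
         else m ++ PySem.Chars.strip l.toList)

def unmultiline_alt (inp : List String) : List String :=
  if inp.length = 1 then inp
  else
    match inp with
    | [] => []   -- Python raises IndexError on inp[0] here; outside Pre_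
    | l0 :: rest =>
      let st0 := l0.toList.foldl stepB (0, 0)
      if st0.1 ≠ 1 then inp
      else
        match goB rest st0 l0.toList with
        | some (m, t) => String.ofList m :: t
        | none => inp

-- ===== PRECONDITION & SPEC =====

-- Both Pythons raise IndexError on the empty list (inp[0]); everything else is admitted.
def Pre_unmultiline (inp : List String) : Prop := inp ≠ []

instance (inp : List String) : Decidable (Pre_unmultiline inp) := by
  unfold Pre_unmultiline; infer_instance

def pvWitness_unmultiline : List String := ["f(a,", "b)"]

def Spec_unmultiline (inp : List String) (out : List String) : Prop := out = unmultiline_alt inp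

instance (inp : List String) (out : List String) : Decidable (Spec_unmultiline inp out) := by
  unfold Spec_unmultiline; infer_instance

-- ===== CLAIM =====

def Claim_equal_unmultiline : Prop :=
  ∀ (inp : List String), Dom_unmultiline inp → Pre_unmultiline inp →
    Spec_unmultiline inp (unmultiline inp)

-- ===== LEMMAS AND PROOFS =====

-- reference scan for the BEFORE phase: first '(' (position + suffix), or ')' first, or neither
inductive BRes where
  | found : Int → List Char → BRes
  | invalid : BRes
  | out : BRes
deriving DecidableEq

def scanBefore : List Char → Int → BRes
  | [], _ => .out
  | c :: cs, i =>
    if c = '(' then .found i cs else if c = ')' then .invalid else scanBefore cs (i + 1)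

-- reference scan for the IN phase: inl (close position, depth-1 comma positions) if the
-- outermost paren closes, inr (final depth, comma positions so far) otherwise
def scanIn : List Char → Int → Int → (Int × List Int) ⊕ (Int × List Int)
  | [], _, d => .inr (d, [])
  | c :: cs, i, d =>
    if c = '(' then scanIn cs (i + 1) (d + 1)
    else if c = ')' then (if d = 1 then .inl (i, []) else scanIn cs (i + 1) (d - 1))
    else if c = ',' ∧ d = 1 then
      (match scanIn cs (i + 1) d with
       | .inl (j, C) => .inl (j, i :: C)
       | .inr (d', C) => .inr (d', i :: C))
    else scanIn cs (i + 1) d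

-- '\n'.join on the list side
def jn (ls : List String) : List Char := List.intercalate ['\n'] (ls.map String.toList)

theorem jn_cons (l : String) (ls : List String) (h : ls ≠ []) :
    jn (l :: ls) = l.toList ++ '\n' :: jn ls := by
  cases ls with
  | nil => simp at h
  | cons y ys => simp [jn, List.intercalate]

theorem parseLoop_in (cs : List Char) :
    ∀ (i d s : Int) (acc : List Int), 1 ≤ d →
    parseLoop cs i (-d) s (-1) acc =
      (match scanIn cs i d with
       | .inl (j, C) => parseFinish 0 s j (acc ++ C)
       | .inr _ => (-1, -1, [])) := by
  induction cs with
  | nil =>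
    intro i d s acc hd
    simp only [parseLoop, scanIn, parseFinish]
    rw [if_pos (by omega : (-d : Int) ≠ 0)]
  | cons c cs ih =>
    intro i d s acc hd
    by_cases h1 : c = '('
    · rw [parseLoop, if_pos h1, if_neg (by omega : ¬(-d - 1 : Int) = -1),
        show (-d - 1 : Int) = -(d + 1) from by ring, ih (i + 1) (d + 1) s acc (by omega),
        scanIn, if_pos h1]
    · by_cases h2 : c = ')'
      · by_cases hdd : d = 1
        · rw [parseLoop, if_neg h1, if_pos h2, if_neg (by omega : ¬(-d + 1 : Int) > 0),
            if_pos (by omega : (-d + 1 : Int) = 0), scanIn, if_neg h1, if_pos h2, if_pos hdd]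
          simp [parseFinish, hdd]
        · rw [parseLoop, if_neg h1, if_pos h2, if_neg (by omega : ¬(-d + 1 : Int) > 0),
            if_neg (by omega : ¬(-d + 1 : Int) = 0),
            show (-d + 1 : Int) = -(d - 1) from by ring, ih (i + 1) (d - 1) s acc (by omega),
            scanIn, if_neg h1, if_pos h2, if_neg hdd]
      · by_cases h3 : c = ','
        · by_cases hdd : d = 1
          · rw [parseLoop, if_neg h1, if_neg h2, if_pos h3, if_pos (by omega : (-d : Int) = -1),
              ih (i + 1) d s (acc ++ [i]) hd, scanIn, if_neg h1, if_neg h2, if_pos ⟨h3, hdd⟩]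
            cases h : scanIn cs (i + 1) d with
            | inl x => cases x; simp
            | inr x => cases x; simp
          · rw [parseLoop, if_neg h1, if_neg h2, if_pos h3, if_neg (by omega : ¬(-d : Int) = -1),
              ih (i + 1) d s acc hd, scanIn, if_neg h1, if_neg h2,
              if_neg (by exact fun hh => hdd hh.2)]
        · rw [parseLoop, if_neg h1, if_neg h2, if_neg h3, ih (i + 1) d s acc hd,
            scanIn, if_neg h1, if_neg h2, if_neg (by exact fun hh => h3 hh.1)]

theorem parseLoop_before (cs : List Char) :
    ∀ (i : Int),
    parseLoop cs i 0 (-1) (-1) [] =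
      (match scanBefore cs i with
       | .found k rest =>
         (match scanIn rest (k + 1) 1 with
          | .inl (j, C) => parseFinish 0 k j C
          | .inr _ => (-1, -1, []))
       | .invalid => (-1, -1, [])
       | .out => (-1, -1, [])) := by
  induction cs with
  | nil => intro i; simp [parseLoop, parseFinish, scanBefore]
  | cons c cs ih =>
    intro i
    by_cases h1 : c = '('
    · rw [parseLoop, if_pos h1, if_pos (by omega : (0 - 1 : Int) = -1),
        show (0 - 1 : Int) = -1 from by ring, scanBefore, if_pos h1]
      have := parseLoop_in cs (i + 1) 1 i [] (by omega)
      simpa using this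
    · by_cases h2 : c = ')'
      · rw [parseLoop, if_neg h1, if_pos h2, if_pos (by omega : (0 + 1 : Int) > 0),
          scanBefore, if_neg h1, if_pos h2]
        simp [parseFinish]
      · by_cases h3 : c = ','
        · rw [parseLoop, if_neg h1, if_neg h2, if_pos h3, if_neg (by omega : ¬(0 : Int) = -1),
            ih (i + 1), scanBefore, if_neg h1, if_neg h2]
        · rw [parseLoop, if_neg h1, if_neg h2, if_neg h3, ih (i + 1),
            scanBefore, if_neg h1, if_neg h2]

theorem scanBefore_append (l r : List Char) :
    ∀ i, scanBefore (l ++ r) i =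
      (match scanBefore l i with
       | .found k rest => .found k (rest ++ r)
       | .invalid => .invalid
       | .out => scanBefore r (i + l.length)) := by
  induction l with
  | nil => intro i; simp [scanBefore]
  | cons c cs ih =>
    intro i
    by_cases h1 : c = '('
    · simp [scanBefore, h1]
    · by_cases h2 : c = ')'
      · simp [scanBefore, h2]
      · simp only [List.cons_append, scanBefore, if_neg h1, if_neg h2, ih (i + 1)]
        cases h : scanBefore cs (i + 1) <;> (simp [List.length_cons]; try ring_nf)

theorem scanBefore_found (l : List Char) :
    ∀ i k rest, scanBefore l i = .found k rest →
      i ≤ k ∧ k + 1 + (rest.length : Int) = i + l.length := by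
  induction l with
  | nil => intro i k rest h; simp [scanBefore] at h
  | cons c cs ih =>
    intro i k rest h
    by_cases h1 : c = '('
    · simp [scanBefore, h1] at h
      obtain ⟨rfl, rfl⟩ := h
      simp; omega
    · by_cases h2 : c = ')'
      · simp [scanBefore, h2] at h
      · simp only [scanBefore, if_neg h1, if_neg h2] at h
        obtain ⟨hik, hlen⟩ := ih (i + 1) k rest h
        constructor
        · omega
        · simp [List.length_cons]; omega

-- map the commas of a scanIn result
def mapC (f : List Int → List Int) : (Int × List Int) ⊕ (Int × List Int) → (Int × List Int) ⊕ (Int × List Int)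
  | .inl (j, C) => .inl (j, f C)
  | .inr (d, C) => .inr (d, f C)

theorem scanIn_append (l r : List Char) :
    ∀ i d, scanIn (l ++ r) i d =
      (match scanIn l i d with
       | .inl x => .inl x
       | .inr (d', C) => mapC (C ++ ·) (scanIn r (i + l.length) d')) := by
  induction l with
  | nil =>
    intro i d
    simp only [List.nil_append, scanIn, List.length_nil, Int.natCast_zero, add_zero]
    cases h : scanIn r i d <;> simp [mapC]
  | cons c cs ih =>
    intro i d
    have e : i + ((c :: cs).length : Int) = i + 1 + (cs.length : Int) := by simp only [List.length_cons]; push_cast; ring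
    rw [e]
    by_cases h1 : c = '('
    · simp only [List.cons_append, scanIn, if_pos h1, ih (i + 1) (d + 1)]
    · by_cases h2 : c = ')'
      · by_cases hd : d = 1
        · simp [List.cons_append, scanIn, h2, hd]
        · simp only [List.cons_append, scanIn, if_neg h1, if_pos h2, if_neg hd,
            ih (i + 1) (d - 1)]
      · by_cases h3 : c = ',' ∧ d = 1
        · simp only [List.cons_append, scanIn, if_neg h1, if_neg h2, if_pos h3,
            ih (i + 1) d]
          cases h : scanIn cs (i + 1) d with
          | inl x => cases x; simp
          | inr x =>
            cases x with
            | mk d' C =>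
              simp only []
              cases h' : scanIn r (i + 1 + ↑cs.length) d' <;>
                (rename_i y; cases y; simp [mapC])
        · simp only [List.cons_append, scanIn, if_neg h1, if_neg h2, if_neg h3,
            ih (i + 1) d]

theorem scanIn_inl_bounds (l : List Char) :
    ∀ i d j C, scanIn l i d = .inl (j, C) →
      i ≤ j ∧ j < i + l.length ∧ ∀ p ∈ C, i ≤ p ∧ p < j := by
  induction l with
  | nil => intro i d j C h; simp [scanIn] at h
  | cons c cs ih =>
    intro i d j C h
    have hlen : ((c :: cs).length : Int) = (cs.length : Int) + 1 := by simp only [List.length_cons]; push_cast; ring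
    by_cases h1 : c = '('
    · rw [scanIn, if_pos h1] at h
      obtain ⟨ha, hb, hc⟩ := ih (i + 1) (d + 1) j C h
      refine ⟨by omega, by omega, fun p hp => ?_⟩
      have := hc p hp; omega
    · by_cases h2 : c = ')'
      · by_cases hd : d = 1
        · rw [scanIn, if_neg h1, if_pos h2, if_pos hd] at h
          obtain ⟨rfl, rfl⟩ : j = i ∧ C = [] := by
            simpa using h.symm
          refine ⟨le_refl _, by simp only [List.length_cons]; push_cast; omega, by simp⟩
        · rw [scanIn, if_neg h1, if_pos h2, if_neg hd] at h
          obtain ⟨ha, hb, hc⟩ := ih (i + 1) (d - 1) j C h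
          refine ⟨by omega, by omega, fun p hp => ?_⟩
          have := hc p hp; omega
      · by_cases h3 : c = ',' ∧ d = 1
        · rw [scanIn, if_neg h1, if_neg h2, if_pos h3] at h
          cases hrec : scanIn cs (i + 1) d with
          | inl x =>
            cases x with
            | mk j' C' =>
              rw [hrec] at h
              simp only [Sum.inl.injEq, Prod.mk.injEq] at h
              obtain ⟨rfl, rfl⟩ := h
              obtain ⟨ha, hb, hc⟩ := ih (i + 1) d j' C' hrec
              refine ⟨by omega, by omega, fun p hp => ?_⟩
              rcases List.mem_cons.mp hp with rfl | hp'
              · omega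
              · have := hc p hp'; omega
          | inr x => rw [hrec] at h; cases x; simp at h
        · rw [scanIn, if_neg h1, if_neg h2, if_neg h3] at h
          obtain ⟨ha, hb, hc⟩ := ih (i + 1) d j C h
          refine ⟨by omega, by omega, fun p hp => ?_⟩
          have := hc p hp; omega

theorem scanIn_inr_bounds (l : List Char) :
    ∀ i d d' C, 1 ≤ d → scanIn l i d = .inr (d', C) →
      1 ≤ d' ∧ ∀ p ∈ C, i ≤ p ∧ p < i + l.length := by
  induction l with
  | nil =>
    intro i d d' C hd h
    simp only [scanIn, Sum.inr.injEq, Prod.mk.injEq] at h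
    obtain ⟨rfl, rfl⟩ := h
    exact ⟨hd, by simp⟩
  | cons c cs ih =>
    intro i d d' C hd h
    by_cases h1 : c = '('
    · rw [scanIn, if_pos h1] at h
      obtain ⟨ha, hb⟩ := ih (i + 1) (d + 1) d' C (by omega) h
      refine ⟨ha, fun p hp => ?_⟩
      have := hb p hp; simp only [List.length_cons]; push_cast; omega
    · by_cases h2 : c = ')'
      · by_cases hdd : d = 1
        · rw [scanIn, if_neg h1, if_pos h2, if_pos hdd] at h; simp at h
        · rw [scanIn, if_neg h1, if_pos h2, if_neg hdd] at h
          obtain ⟨ha, hb⟩ := ih (i + 1) (d - 1) d' C (by omega) h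
          refine ⟨ha, fun p hp => ?_⟩
          have := hb p hp; simp only [List.length_cons]; push_cast; omega
      · by_cases h3 : c = ',' ∧ d = 1
        · rw [scanIn, if_neg h1, if_neg h2, if_pos h3] at h
          cases hrec : scanIn cs (i + 1) d with
          | inl x => rw [hrec] at h; cases x; simp at h
          | inr x =>
            cases x with
            | mk d'' C' =>
              rw [hrec] at h
              simp only [Sum.inr.injEq, Prod.mk.injEq] at h
              obtain ⟨rfl, rfl⟩ := h
              obtain ⟨ha, hb⟩ := ih (i + 1) d d'' C' hd hrec
              refine ⟨ha, fun p hp => ?_⟩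
              rcases List.mem_cons.mp hp with rfl | hp'
              · simp only [List.length_cons]; push_cast; omega
              · have := hb p hp'; simp only [List.length_cons]; push_cast; omega
        · rw [scanIn, if_neg h1, if_neg h2, if_neg h3] at h
          obtain ⟨ha, hb⟩ := ih (i + 1) d d' C hd h
          refine ⟨ha, fun p hp => ?_⟩
          have := hb p hp; simp only [List.length_cons]; push_cast; omega

theorem scanIn_inr_last (l : List Char) :
    ∀ i d d' C, 1 ≤ d → scanIn l i d = .inr (d', C) →
      ((i + l.length - 1) ∈ C ↔ ([','] <:+ l ∧ d' = 1)) := by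
  induction l with
  | nil =>
    intro i d d' C hd h
    simp only [scanIn, Sum.inr.injEq, Prod.mk.injEq] at h
    obtain ⟨rfl, rfl⟩ := h
    simp
  | cons c cs ih =>
    intro i d d' C hd h
    have hlast : ([','] <:+ c :: cs) ↔ (if cs = [] then c = ',' else [','] <:+ cs) := by
      split
      · rename_i hcs; subst hcs
        constructor
        · intro hs; have := List.IsSuffix.eq_of_length hs (by simp); simpa using this.symm
        · intro hc; subst hc; exact List.suffix_rfl
      · rename_i hcs
        constructor
        · intro hs
          rcases hs with ⟨t, ht⟩
          cases t with
          | nil => simp at ht; simp [ht.2] at hcs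
          | cons a t' => simp at ht; exact ⟨t', ht.2⟩
        · intro hs; exact hs.trans (List.suffix_cons c cs)
    by_cases hcs : cs = []
    · subst hcs
      -- single char
      simp only [List.length_cons, List.length_nil] at *
      by_cases h1 : c = '('
      · rw [scanIn, if_pos h1] at h
        simp only [scanIn, Sum.inr.injEq, Prod.mk.injEq] at h
        obtain ⟨rfl, rfl⟩ := h
        simp [hlast]
        omega
      · by_cases h2 : c = ')'
        · by_cases hdd : d = 1
          · rw [scanIn, if_neg h1, if_pos h2, if_pos hdd] at h; simp at h
          · rw [scanIn, if_neg h1, if_pos h2, if_neg hdd] at h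
            simp only [scanIn, Sum.inr.injEq, Prod.mk.injEq] at h
            obtain ⟨rfl, rfl⟩ := h
            simp [h2]
            intro hs
            have h5 := List.IsSuffix.eq_of_length hs (by simp)
            simp at h5
        · by_cases h3 : c = ',' ∧ d = 1
          · rw [scanIn, if_neg h1, if_neg h2, if_pos h3] at h
            simp only [scanIn] at h
            simp only [Sum.inr.injEq, Prod.mk.injEq] at h
            obtain ⟨rfl, rfl⟩ := h
            simp [h3.1, h3.2]
          · rw [scanIn, if_neg h1, if_neg h2, if_neg h3] at h
            simp only [scanIn, Sum.inr.injEq, Prod.mk.injEq] at h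
            obtain ⟨rfl, rfl⟩ := h
            simp [hlast, h3]
    · -- cs ≠ []: position i is not the last one
      have hpos : (1:Int) ≤ cs.length := by
        cases cs with | nil => simp at hcs | cons a t => simp
      have harith : ∀ (z : Int), i + (c :: cs).length - 1 = (i + 1) + cs.length - 1 := by
        intro _; simp only [List.length_cons]; push_cast; ring
      rw [harith 0, hlast, if_neg hcs]
      by_cases h1 : c = '('
      · rw [scanIn, if_pos h1] at h
        exact ih (i + 1) (d + 1) d' C (by omega) h
      · by_cases h2 : c = ')'
        · by_cases hdd : d = 1
          · rw [scanIn, if_neg h1, if_pos h2, if_pos hdd] at h; simp at h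
          · rw [scanIn, if_neg h1, if_pos h2, if_neg hdd] at h
            exact ih (i + 1) (d - 1) d' C (by omega) h
        · by_cases h3 : c = ',' ∧ d = 1
          · rw [scanIn, if_neg h1, if_neg h2, if_pos h3] at h
            cases hrec : scanIn cs (i + 1) d with
            | inl x => rw [hrec] at h; cases x; simp at h
            | inr x =>
              cases x with
              | mk d'' C' =>
                rw [hrec] at h
                simp only [Sum.inr.injEq, Prod.mk.injEq] at h
                obtain ⟨heq, hC⟩ := h
                subst heq; subst hC
                have hmem := ih (i + 1) d _ _ hd hrec
                rw [List.mem_cons, hmem]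
                constructor
                · rintro (he | hr)
                  · omega
                  · exact hr
                · intro hr; right; exact hr
          · rw [scanIn, if_neg h1, if_neg h2, if_neg h3] at h
            exact ih (i + 1) d d' C hd h

theorem foldl_stepB_absorb (cs : List Char) (st : Int × Int)
    (h : st.1 ≠ 0 ∧ st.1 ≠ 1) : cs.foldl stepB st = st := by
  induction cs with
  | nil => rfl
  | cons c cs ih =>
    rw [List.foldl_cons, show stepB st c = st from by simp [stepB, h.1, h.2], ih]

theorem foldl_stepB_in (cs : List Char) :
    ∀ (i d : Int), 1 ≤ d →
    cs.foldl stepB (1, d) =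
      (match scanIn cs i d with
       | .inl _ => (2, 0)
       | .inr (d', _) => (1, d')) := by
  induction cs with
  | nil => intro i d hd; simp [scanIn]
  | cons c cs ih =>
    intro i d hd
    rw [List.foldl_cons]
    by_cases h1 : c = '('
    · rw [show stepB (1, d) c = (1, d + 1) from by simp [stepB, h1], ih (i + 1) (d + 1) (by omega),
        scanIn, if_pos h1]
    · by_cases h2 : c = ')'
      · by_cases hdd : d = 1
        · rw [show stepB (1, d) c = (2, 0) from by simp [stepB, h2, hdd],
            foldl_stepB_absorb cs (2, 0) (by simp), scanIn, if_neg h1, if_pos h2, if_pos hdd]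
        · rw [show stepB (1, d) c = (1, d - 1) from by simp [stepB, h2, hdd],
            ih (i + 1) (d - 1) (by omega), scanIn, if_neg h1, if_pos h2, if_neg hdd]
      · have hstep : stepB (1, d) c = (1, d) := by simp [stepB, h1, h2]
        by_cases h3 : c = ',' ∧ d = 1
        · rw [hstep, ih (i + 1) d hd, scanIn, if_neg h1, if_neg h2, if_pos h3]
          cases h : scanIn cs (i + 1) d with
          | inl x => cases x; simp
          | inr x => cases x; simp
        · rw [hstep, ih (i + 1) d hd, scanIn, if_neg h1, if_neg h2, if_neg h3]

theorem foldl_stepB_before (cs : List Char) :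
    ∀ (i : Int),
    cs.foldl stepB (0, 0) =
      (match scanBefore cs i with
       | .found _ rest => rest.foldl stepB (1, 1)
       | .invalid => (3, 0)
       | .out => (0, 0)) := by
  induction cs with
  | nil => intro i; simp [scanBefore]
  | cons c cs ih =>
    intro i
    rw [List.foldl_cons]
    by_cases h1 : c = '('
    · rw [show stepB (0, 0) c = (1, 1) from by simp [stepB, h1], scanBefore, if_pos h1]
    · by_cases h2 : c = ')'
      · rw [show stepB (0, 0) c = (3, 0) from by simp [stepB, h2],
          foldl_stepB_absorb cs (3, 0) (by simp), scanBefore, if_neg h1, if_pos h2]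
      · rw [show stepB (0, 0) c = (0, 0) from by simp [stepB, h1, h2], ih (i + 1),
          scanBefore, if_neg h1, if_neg h2]

theorem jn_nil : jn [] = [] := by simp [jn, List.intercalate]

theorem jn_single (l : String) : jn [l] = l.toList := by simp [jn, List.intercalate]

theorem merge_agree (ls : List String) :
    ∀ (m : List Char) (ci d j : Int) (Cpre C : List Int), 1 ≤ d →
      (∀ p ∈ Cpre, p < ci - 1) →
      scanIn (jn ls) ci d = .inl (j, C) →
      ∃ m' t, goB ls (1, d) m = some (m', t) ∧
        mergeA j (Cpre ++ C) ls m ci = String.ofList m' :: t := by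
  induction ls with
  | nil =>
    intro m ci d j Cpre C hd hpre h
    rw [jn_nil] at h; simp [scanIn] at h
  | cons l ls ih =>
    intro m ci d j Cpre C hd hpre hscan
    have hlenl : PySem.Chars.len l.toList = (l.toList.length : Int) := rfl
    cases hls : ls with
    | nil =>
      subst hls
      rw [jn_single] at hscan
      have hbounds := scanIn_inl_bounds _ _ _ _ _ hscan
      have hnotlt : ¬ j < ci := by omega
      have hst : l.toList.foldl stepB (1, d) = (2, 0) := by
        rw [foldl_stepB_in l.toList ci d hd, hscan]
      have hnc : ¬ (ci + PySem.Chars.len l.toList - 1) ∈ Cpre ++ C := by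
        rw [hlenl]
        intro hmem
        rcases List.mem_append.mp hmem with hp | hp
        · have := hpre _ hp; omega
        · have h1 := (hbounds.2.2 _ hp).2
          have h2 := hbounds.2.1
          omega
      refine ⟨m ++ PySem.Chars.strip l.toList, [], ?_, ?_⟩
      · rw [goB, if_neg (by norm_num), hst,
          if_neg (by rintro ⟨-, h2⟩; simp at h2), goB]
        norm_num
      · rw [mergeA, if_neg hnotlt, if_neg hnc, mergeA]
    | cons l2 ls2 =>
      subst hls
      have hlsne : l2 :: ls2 ≠ [] := by simp
      rw [jn_cons l _ hlsne] at hscan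
      rw [scanIn_append] at hscan
      cases hfirst : scanIn l.toList ci d with
      | inl x =>
        obtain ⟨j1, C1⟩ := x
        rw [hfirst] at hscan
        dsimp only at hscan
        simp only [Sum.inl.injEq, Prod.mk.injEq] at hscan
        obtain ⟨rfl, rfl⟩ := hscan
        have hbounds := scanIn_inl_bounds _ _ _ _ _ hfirst
        have hnotlt : ¬ j1 < ci := by omega
        have hst : l.toList.foldl stepB (1, d) = (2, 0) := by
          rw [foldl_stepB_in l.toList ci d hd, hfirst]
        have hnc : ¬ (ci + PySem.Chars.len l.toList - 1) ∈ Cpre ++ C1 := by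
          rw [hlenl]
          intro hmem
          rcases List.mem_append.mp hmem with hp | hp
          · have := hpre _ hp; omega
          · have h1 := (hbounds.2.2 _ hp).2
            have h2 := hbounds.2.1
            omega
        refine ⟨m ++ PySem.Chars.strip l.toList, l2 :: ls2, ?_, ?_⟩
        · rw [goB, if_neg (by norm_num), hst,
            if_neg (by rintro ⟨-, h2⟩; simp at h2), goB, if_pos rfl]
        · rw [mergeA, if_neg hnotlt, if_neg hnc, mergeA,
            if_pos (show j1 < ci + PySem.Chars.len l.toList + 1 from by
              rw [hlenl]; have := hbounds.2.1; omega)]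
      | inr x =>
        obtain ⟨d1, C1⟩ := x
        rw [hfirst] at hscan
        dsimp only at hscan
        have hinr := scanIn_inr_bounds _ _ _ _ _ hd hfirst
        have hnl : scanIn ('\n' :: jn (l2 :: ls2)) (ci + l.toList.length) d1 =
            scanIn (jn (l2 :: ls2)) (ci + l.toList.length + 1) d1 := by
          rw [scanIn, if_neg (by decide), if_neg (by decide),
            if_neg (by rintro ⟨h, -⟩; simp at h)]
        rw [hnl] at hscan
        cases hrest : scanIn (jn (l2 :: ls2)) (ci + l.toList.length + 1) d1 with
        | inl y =>
          obtain ⟨j2, C2⟩ := y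
          rw [hrest] at hscan
          simp only [mapC, Sum.inl.injEq, Prod.mk.injEq] at hscan
          obtain ⟨rfl, rfl⟩ := hscan
          have hbounds2 := scanIn_inl_bounds _ _ _ _ _ hrest
          have hnotlt : ¬ j2 < ci := by
            have h1 := hbounds2.1
            have h2 : (0:Int) ≤ l.toList.length := by positivity
            omega
          have hst : l.toList.foldl stepB (1, d) = (1, d1) := by
            rw [foldl_stepB_in l.toList ci d hd, hfirst]
          have hlastiff := scanIn_inr_last l.toList ci d d1 C1 hd hfirst
          have hiff : (ci + PySem.Chars.len l.toList - 1) ∈ Cpre ++ (C1 ++ C2) ↔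
              (PySem.Chars.endswith l.toList [','] = true ∧
                ((1 : Int), d1) = ((1 : Int), (1 : Int))) := by
            rw [hlenl]
            constructor
            · intro hmem
              rcases List.mem_append.mp hmem with hp | hp
              · have := hpre _ hp; omega
              · rcases List.mem_append.mp hp with hp | hp
                · obtain ⟨hsuf, hd1⟩ := hlastiff.mp hp
                  exact ⟨(PySem.Chars.endswith_iff _ _).mpr hsuf, by rw [hd1]⟩
                · have := (hbounds2.2.2 _ hp).1
                  omega
            · rintro ⟨hend, heq⟩
              have hd1 : d1 = 1 := by simpa using congrArg Prod.snd heq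
              have hmem := hlastiff.mpr ⟨(PySem.Chars.endswith_iff _ _).mp hend, hd1⟩
              exact List.mem_append.mpr (Or.inr (List.mem_append.mpr (Or.inl hmem)))
          have hpre' : ∀ p ∈ Cpre ++ C1, p < (ci + l.toList.length + 1) - 1 := by
            intro p hp
            rcases List.mem_append.mp hp with hp | hp
            · have := hpre _ hp
              have h2 : (0:Int) ≤ l.toList.length := by positivity
              omega
            · have := (hinr.2 _ hp).2; omega
          by_cases hbc : PySem.Chars.endswith l.toList [','] = true ∧
              ((1 : Int), d1) = ((1 : Int), (1 : Int))
          · obtain ⟨m', t, hg, hmrg⟩ := ih (m ++ PySem.Chars.strip l.toList ++ [' '])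
              (ci + l.toList.length + 1) d1 j2 (Cpre ++ C1) C2 hinr.1 hpre' hrest
            refine ⟨m', t, ?_, ?_⟩
            · rw [goB, if_neg (by norm_num), hst, if_pos hbc, hg]
            · rw [mergeA, if_neg hnotlt, if_pos (hiff.mpr hbc),
                show Cpre ++ (C1 ++ C2) = (Cpre ++ C1) ++ C2 from by simp, hlenl]
              exact hmrg
          · obtain ⟨m', t, hg, hmrg⟩ := ih (m ++ PySem.Chars.strip l.toList)
              (ci + l.toList.length + 1) d1 j2 (Cpre ++ C1) C2 hinr.1 hpre' hrest
            refine ⟨m', t, ?_, ?_⟩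
            · rw [goB, if_neg (by norm_num), hst, if_neg hbc, hg]
            · rw [mergeA, if_neg hnotlt, if_neg (fun hmem => hbc (hiff.mp hmem)),
                show Cpre ++ (C1 ++ C2) = (Cpre ++ C1) ++ C2 from by simp, hlenl]
              exact hmrg
        | inr y =>
          rw [hrest] at hscan
          obtain ⟨d2, C3⟩ := y
          simp [mapC] at hscan



theorem goB_none (ls : List String) :
    ∀ (m : List Char) (ci d d' : Int) (C : List Int), 1 ≤ d →
      scanIn (jn ls) ci d = .inr (d', C) →
      goB ls (1, d) m = none := by
  induction ls with
  | nil => intro m ci d d' C hd h; rw [goB]; norm_num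
  | cons l ls ih =>
    intro m ci d d' C hd hscan
    cases hls : ls with
    | nil =>
      subst hls
      rw [jn_single] at hscan
      have hst : l.toList.foldl stepB (1, d) = (1, d') := by
        rw [foldl_stepB_in l.toList ci d hd]
        cases hf : scanIn l.toList ci d with
        | inl x => rw [hf] at hscan; cases x; simp at hscan
        | inr x =>
          obtain ⟨a, b⟩ := x
          rw [hf] at hscan
          simp only [Sum.inr.injEq, Prod.mk.injEq] at hscan
          rw [hscan.1]
      rw [goB, if_neg (by norm_num), hst, goB]
      norm_num
    | cons l2 ls2 =>
      subst hls
      have hlsne : l2 :: ls2 ≠ [] := by simp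
      rw [jn_cons l _ hlsne, scanIn_append] at hscan
      cases hfirst : scanIn l.toList ci d with
      | inl x => rw [hfirst] at hscan; obtain ⟨a, b⟩ := x; simp at hscan
      | inr x =>
        obtain ⟨d1, C1⟩ := x
        rw [hfirst] at hscan
        dsimp only at hscan
        have hinr := scanIn_inr_bounds _ _ _ _ _ hd hfirst
        have hnl : scanIn ('\n' :: jn (l2 :: ls2)) (ci + l.toList.length) d1 =
            scanIn (jn (l2 :: ls2)) (ci + l.toList.length + 1) d1 := by
          rw [scanIn, if_neg (by decide), if_neg (by decide),
            if_neg (by rintro ⟨h, -⟩; simp at h)]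
        rw [hnl] at hscan
        cases hrest : scanIn (jn (l2 :: ls2)) (ci + l.toList.length + 1) d1 with
        | inl y => rw [hrest] at hscan; obtain ⟨a, b⟩ := y; simp [mapC] at hscan
        | inr y =>
          have hst : l.toList.foldl stepB (1, d) = (1, d1) := by
            rw [foldl_stepB_in l.toList ci d hd, hfirst]
          rw [goB, if_neg (by norm_num), hst]
          exact ih _ _ _ _ _ hinr.1 hrest

-- match-free wrappers so the scrutinees can be case-split inside large goals
def finA (k : Int) : (Int × List Int) ⊕ (Int × List Int) → Int × Int × List Int
  | .inl (j, C) => parseFinish 0 k j C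
  | .inr _ => (-1, -1, [])

def parseBRes : BRes → Int × Int × List Int
  | .found k rest => finA k (scanIn rest (k + 1) 1)
  | .invalid => (-1, -1, [])
  | .out => (-1, -1, [])

def befCont (r : List Char) (i2 : Int) : BRes → BRes
  | .found k rest => .found k (rest ++ r)
  | .invalid => .invalid
  | .out => scanBefore r i2

def appCont (r : List Char) (i2 : Int) :
    (Int × List Int) ⊕ (Int × List Int) → (Int × List Int) ⊕ (Int × List Int)
  | .inl x => .inl x
  | .inr (d', C) => mapC (C ++ ·) (scanIn r i2 d')

def stIn : (Int × List Int) ⊕ (Int × List Int) → Int × Int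
  | .inl _ => (2, 0)
  | .inr (d', _) => (1, d')

def stBef : BRes → Int × Int
  | .found _ rest => rest.foldl stepB (1, 1)
  | .invalid => (3, 0)
  | .out => (0, 0)

theorem parseLoop_before' (cs : List Char) (i : Int) :
    parseLoop cs i 0 (-1) (-1) [] = parseBRes (scanBefore cs i) := by
  rw [parseLoop_before cs i]
  show _ = parseBRes _
  cases scanBefore cs i with
  | found k rest => cases scanIn rest (k + 1) 1 <;> rfl
  | invalid => rfl
  | out => rfl

theorem scanBefore_append' (l r : List Char) (i : Int) :
    scanBefore (l ++ r) i = befCont r (i + l.length) (scanBefore l i) := by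
  rw [scanBefore_append l r i]
  cases scanBefore l i <;> rfl

theorem scanIn_append' (l r : List Char) (i d : Int) :
    scanIn (l ++ r) i d = appCont r (i + l.length) (scanIn l i d) := by
  rw [scanIn_append l r i d]
  cases h : scanIn l i d with
  | inl x => rfl
  | inr x => cases x; rfl

theorem foldl_stepB_in' (cs : List Char) (i d : Int) (hd : 1 ≤ d) :
    cs.foldl stepB (1, d) = stIn (scanIn cs i d) := by
  rw [foldl_stepB_in cs i d hd]
  cases h : scanIn cs i d with
  | inl x => rfl
  | inr x => cases x; rfl

theorem foldl_stepB_before' (cs : List Char) (i : Int) :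
    cs.foldl stepB (0, 0) = stBef (scanBefore cs i) := by
  rw [foldl_stepB_before cs i]
  cases scanBefore cs i <;> rfl

-- A returns the input unchanged whenever the merge loop breaks on its first line
theorem mergeA_break (e : Int) (commas : List Int) (l : String) (ls : List String)
    (l0 : List Char) (ci : Int) (h : e < ci) :
    mergeA e commas (l :: ls) l0 ci = String.ofList l0 :: l :: ls := by
  rw [mergeA, if_pos h]

theorem top_eq (inp : List String) (hne : inp ≠ []) :
    unmultiline inp = unmultiline_alt inp := by
  cases inp with
  | nil => exact absurd rfl hne
  | cons l0 rest =>
    cases rest with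
    | nil => rfl
    | cons l1 rest' =>
      have hlen : ¬ (l0 :: l1 :: rest').length = 1 := by simp
      rw [unmultiline, unmultiline_alt, if_neg hlen, if_neg hlen]
      dsimp only
      have hlenl0 : PySem.Chars.len l0.toList = (l0.toList.length : Int) := rfl
      have htxt : (PySem.Str.join "\n" (l0 :: l1 :: rest')).toList =
          jn (l0 :: l1 :: rest') := by
        rw [PySem.Str.toList_join]; rfl
      have hjn : jn (l0 :: l1 :: rest') = l0.toList ++ '\n' :: jn (l1 :: rest') :=
        jn_cons _ _ (by simp)
      have hpp : pyParse (jn (l0 :: l1 :: rest')) 0 =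
          parseLoop (jn (l0 :: l1 :: rest')) 0 0 (-1) (-1) [] := rfl
      rw [htxt, hpp, parseLoop_before' _ 0, hjn, scanBefore_append',
        foldl_stepB_before' l0.toList 0]
      have hnlB : scanBefore ('\n' :: jn (l1 :: rest')) (0 + l0.toList.length) =
          scanBefore (jn (l1 :: rest')) (0 + l0.toList.length + 1) := by
        rw [scanBefore, if_neg (by decide), if_neg (by decide)]
      cases hB : scanBefore l0.toList 0 with
      | invalid =>
        simp only [befCont, stBef, parseBRes]
        rw [if_neg (by rw [hlenl0]; omega), if_pos (by norm_num),
          mergeA_break _ _ _ _ _ _ (by rw [hlenl0]; omega), String.ofList_toList]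
      | out =>
        simp only [befCont, stBef, parseBRes]
        rw [hnlB]
        cases hB2 : scanBefore (jn (l1 :: rest')) (0 + l0.toList.length + 1) with
        | invalid =>
          simp only []
          rw [if_neg (by rw [hlenl0]; omega), if_pos (by norm_num),
            mergeA_break _ _ _ _ _ _ (by rw [hlenl0]; omega), String.ofList_toList]
        | out =>
          simp only []
          rw [if_neg (by rw [hlenl0]; omega), if_pos (by norm_num),
            mergeA_break _ _ _ _ _ _ (by rw [hlenl0]; omega), String.ofList_toList]
        | found k rest1 =>
          have hk := (scanBefore_found _ _ _ _ hB2).1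
          simp only []
          cases hI : scanIn rest1 (k + 1) 1 with
          | inl y =>
            obtain ⟨j, C⟩ := y
            simp only [finA]
            rw [show parseFinish 0 k j C = (k, j, C) from by
              rw [parseFinish, if_neg (by omega), if_neg (by rintro ⟨h1, -⟩; omega)]]
            rw [if_pos (by rw [hlenl0]; omega), if_pos (by norm_num)]
          | inr y =>
            simp only [finA]
            rw [if_neg (by rw [hlenl0]; omega), if_pos (by norm_num),
              mergeA_break _ _ _ _ _ _ (by rw [hlenl0]; omega), String.ofList_toList]
      | found k rest1 =>
        have hkb := scanBefore_found _ _ _ _ hB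
        simp only [befCont, stBef, parseBRes]
        rw [scanIn_append']
        have hrlen : (k + 1) + (rest1.length : Int) = l0.toList.length := by omega
        cases hF : scanIn rest1 (k + 1) 1 with
        | inl y =>
          obtain ⟨j1, C1⟩ := y
          have hbounds := scanIn_inl_bounds _ _ _ _ _ hF
          simp only [appCont, finA]
          rw [show parseFinish 0 k j1 C1 = (k, j1, C1) from by
            rw [parseFinish, if_neg (by omega), if_neg (by rintro ⟨h1, -⟩; omega)]]
          rw [if_neg (by
            rw [hlenl0]
            have h1 : (0:Int) ≤ rest1.length := by positivity
            omega)]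
          rw [foldl_stepB_in' rest1 (k + 1) 1 (by omega), hF]
          simp only [stIn]
          rw [if_pos (by norm_num),
            mergeA_break _ _ _ _ _ _ (by rw [hlenl0]; omega), String.ofList_toList]
        | inr y =>
          obtain ⟨d1, C1⟩ := y
          have hinr := scanIn_inr_bounds _ _ _ _ _ (by omega) hF
          have hnlI : scanIn ('\n' :: jn (l1 :: rest')) (k + 1 + rest1.length) d1 =
              scanIn (jn (l1 :: rest')) (k + 1 + rest1.length + 1) d1 := by
            rw [scanIn, if_neg (by decide), if_neg (by decide),
              if_neg (by rintro ⟨h, -⟩; simp at h)]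
          simp only [appCont]
          rw [hnlI, hrlen, foldl_stepB_in' rest1 (k + 1) 1 (by omega), hF]
          simp only [stIn]
          cases hR : scanIn (jn (l1 :: rest')) ((l0.toList.length : Int) + 1) d1 with
          | inl z =>
            obtain ⟨j2, C2⟩ := z
            simp only [mapC, finA]
            rw [show parseFinish 0 k j2 (C1 ++ C2) = (k, j2, C1 ++ C2) from by
              rw [parseFinish, if_neg (by omega), if_neg (by rintro ⟨h1, -⟩; omega)]]
            rw [if_neg (by
              rw [hlenl0]
              have h1 : (0:Int) ≤ rest1.length := by positivity
              omega)]
            rw [if_neg (by norm_num)]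
            obtain ⟨m', t, hg, hmrg⟩ := merge_agree (l1 :: rest') l0.toList
              ((l0.toList.length : Int) + 1) d1 j2 C1 C2 hinr.1
              (by intro p hp; have := (hinr.2 _ hp).2; omega) hR
            rw [hg, hlenl0]
            exact hmrg
          | inr z =>
            obtain ⟨d2, C3⟩ := z
            simp only [mapC, finA]
            rw [if_neg (by rw [hlenl0]; omega), if_neg (by norm_num),
              goB_none (l1 :: rest') l0.toList ((l0.toList.length : Int) + 1) d1 d2 C3
                hinr.1 hR,
              mergeA_break _ _ _ _ _ _ (by rw [hlenl0]; omega), String.ofList_toList]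

-- ===== VERDICT =====
theorem unmultiline_spec : Claim_equal_unmultiline := by
  intro inp _hdom hpre
  unfold Spec_unmultiline
  exact top_eq inp hpre
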